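-- pv_equiv track=rewrite | github.com/Miyamura80/Fuma_Fuzz | src2/environment/pyevm_env.py | create_function_lookup
-- ===== SOURCE A (Python) =====
-- from typing import Tuple, Optional
--
-- MAX_FUNC_VIEWABLE: int = 10
--
-- MAX_FUNC_NONPAYABLE: int = 10
--
-- MAX_FUNC_PAYABLE: int = 5
--
-- def create_function_lookup(contract_abi: dict) -> Tuple[dict, dict]:
--     f_v_set, f_action_set = [], []
--     for func in contract_abi:
--         if func["stateMutability"]=="view":
--             f_v_set.append(func)
--         elif func["stateMutability"]=="payable" or func["stateMutability"]=="nonpayable":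
--             f_action_set.append(func)
--
--     f_v_set += [{}] * (MAX_FUNC_VIEWABLE - len(f_v_set))
--     f_action_set += [{}] * (MAX_FUNC_PAYABLE + MAX_FUNC_NONPAYABLE - len(f_action_set))
--
--     action_function_lookup = {}
--     dynamic_obs_func_lookup = {}
--     for i in range(MAX_FUNC_PAYABLE+MAX_FUNC_NONPAYABLE):
--         if f_action_set[i] != {} and "name" in f_action_set[i]:
--             action_function_lookup[i] = f_action_set[i]["name"]
--
--     for i in range(MAX_FUNC_VIEWABLE):
--         if f_v_set[i] != {} and "name" in f_v_set[i]:
--             dynamic_obs_func_lookup[i] = f_v_set[i]["name"]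
--
--     return action_function_lookup, dynamic_obs_func_lookup
-- ===== SOURCE B (Python) =====
-- MAX_FUNC_VIEWABLE: int = 10
-- MAX_FUNC_NONPAYABLE: int = 10
-- MAX_FUNC_PAYABLE: int = 5
--
-- def create_function_lookup(contract_abi):
--     # Single pass with two counters; no intermediate lists, no {} padding.
--     action_function_lookup = {}
--     dynamic_obs_func_lookup = {}
--     view_idx = 0
--     action_idx = 0
--     for func in contract_abi:
--         sm = func["stateMutability"]
--         if sm == "view":
--             if view_idx < MAX_FUNC_VIEWABLE and "name" in func:
--                 dynamic_obs_func_lookup[view_idx] = func["name"]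
--             view_idx += 1
--         elif sm == "payable" or sm == "nonpayable":
--             if action_idx < MAX_FUNC_PAYABLE + MAX_FUNC_NONPAYABLE and "name" in func:
--                 action_function_lookup[action_idx] = func["name"]
--             action_idx += 1
--     return action_function_lookup, dynamic_obs_func_lookup
-- ===== Notes on version B (the rewrite author's own statement) =====
-- stated objective: simpler
-- what changed: Replaces the partition-into-two-lists-then-pad-with-{}-then-indexed-rescan approach by a single pass over contract_abi with two counters, inserting capped entries directly into the two result dicts.
import Mathlib
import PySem

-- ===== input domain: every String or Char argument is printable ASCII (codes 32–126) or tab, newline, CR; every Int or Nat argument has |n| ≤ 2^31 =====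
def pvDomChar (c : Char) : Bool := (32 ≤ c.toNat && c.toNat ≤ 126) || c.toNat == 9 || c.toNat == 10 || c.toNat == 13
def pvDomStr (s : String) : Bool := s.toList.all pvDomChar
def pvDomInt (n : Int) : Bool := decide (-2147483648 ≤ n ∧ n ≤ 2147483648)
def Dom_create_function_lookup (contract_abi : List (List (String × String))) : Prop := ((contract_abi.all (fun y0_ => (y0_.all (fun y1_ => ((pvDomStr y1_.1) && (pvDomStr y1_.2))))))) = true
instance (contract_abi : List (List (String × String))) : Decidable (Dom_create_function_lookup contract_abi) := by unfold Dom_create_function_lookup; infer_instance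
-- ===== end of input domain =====

-- B replaces A's partition-then-pad-then-indexed-rescan by a single pass with two
-- counters; objective: simpler (same O(n) cost).

-- ===== PORT A =====
-- shared tiny abbreviations for the Python dict accesses both versions perform
def pvIsView (f : List (String × String)) : Bool :=
  (PySem.Dict.mk f).get? "stateMutability" == some "view"
def pvIsAction (f : List (String × String)) : Bool :=
  ((PySem.Dict.mk f).get? "stateMutability" == some "payable") ||
  ((PySem.Dict.mk f).get? "stateMutability" == some "nonpayable")
def pvHasName (f : List (String × String)) : Bool := (PySem.Dict.mk f).contains "name"
def pvName (f : List (String × String)) : String := ((PySem.Dict.mk f).get? "name").getD ""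

-- the second phase of A: for i in range(n): if set[i] != {} and "name" in set[i]: d[i] = set[i]["name"]
def pvIndexLoop (fs : List (List (String × String))) (n : Nat) : PySem.Dict Int String :=
  (List.range n).foldl (fun (d : PySem.Dict Int String) (i : Nat) =>
    let f := PySem.List.pyGetD fs (i : Int) []   -- index is always in range (list padded to length ≥ n)
    if f ≠ [] ∧ pvHasName f = true then d.insert (i : Int) (pvName f) else d)
    PySem.Dict.empty

def create_function_lookup (contract_abi : List (List (String × String))) : (List (Int × String)) × (List (Int × String)) :=
  -- f_v_set, f_action_set = [], []; for func in contract_abi: … append …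
  let part := contract_abi.foldl (fun (s : List (List (String × String)) × List (List (String × String))) func =>
    if pvIsView func then (s.1 ++ [func], s.2)
    else if pvIsAction func then (s.1, s.2 ++ [func])
    else s) ([], [])
  -- += [{}] * (MAX - len): Python's negative repeat count gives [], like Nat subtraction
  let f_v := part.1 ++ List.replicate (10 - part.1.length) []
  let f_act := part.2 ++ List.replicate (15 - part.2.length) []
  let action := pvIndexLoop f_act 15
  let dyn := pvIndexLoop f_v 10
  (action.items, dyn.items)

-- ===== PORT B =====
def pvBLoop : List (List (String × String)) → Nat → Nat → PySem.Dict Int String → PySem.Dict Int String → PySem.Dict Int String × PySem.Dict Int String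
  | [], _, _, da, dv => (da, dv)
  | func :: rest, ai, vi, da, dv =>
    if pvIsView func then
      pvBLoop rest ai (vi + 1) da (if vi < 10 ∧ pvHasName func = true then dv.insert (vi : Int) (pvName func) else dv)
    else if pvIsAction func then
      pvBLoop rest (ai + 1) vi (if ai < 15 ∧ pvHasName func = true then da.insert (ai : Int) (pvName func) else da) dv
    else pvBLoop rest ai vi da dv

def create_function_lookup_alt (contract_abi : List (List (String × String))) : (List (Int × String)) × (List (Int × String)) :=
  let r := pvBLoop contract_abi 0 0 PySem.Dict.empty PySem.Dict.empty
  (r.1.items, r.2.items)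

-- ===== PRECONDITION & SPEC =====
-- Pre_ excludes exactly the inputs where the Python A raises KeyError: a function dict
-- without a "stateMutability" key.
def Pre_create_function_lookup (contract_abi : List (List (String × String))) : Prop :=
  ∀ func ∈ contract_abi, (PySem.Dict.mk func).contains "stateMutability" = true
instance (contract_abi : List (List (String × String))) : Decidable (Pre_create_function_lookup contract_abi) := by unfold Pre_create_function_lookup; infer_instance
def pvWitness_create_function_lookup : (List (List (String × String))) :=
  [[("stateMutability", "view"), ("name", "f")], [("stateMutability", "payable"), ("name", "g")]]

def Spec_create_function_lookup (contract_abi : List (List (String × String))) (out : (List (Int × String)) × (List (Int × String))) : Prop := out = create_function_lookup_alt contract_abi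
instance (contract_abi : List (List (String × String))) (out : (List (Int × String)) × (List (Int × String))) : Decidable (Spec_create_function_lookup contract_abi out) := by unfold Spec_create_function_lookup; infer_instance

-- ===== CLAIM (what is proved, stated in full; the proofs are below) =====
def Claim_equal_create_function_lookup : Prop := ∀ (contract_abi : List (List (String × String))), Dom_create_function_lookup contract_abi → Pre_create_function_lookup contract_abi → Spec_create_function_lookup contract_abi (create_function_lookup contract_abi)

-- ===== LEMMAS AND PROOFS =====

-- common spec: the entries (i, name) contributed by the j-th kept function, counting
-- from index i, capped at cap
def pvMkL : List (List (String × String)) → Nat → Nat → List (Int × String)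
  | [], _, _ => []
  | f :: fs, i, cap =>
    (if i < cap ∧ pvHasName f = true then [((i : Int), pvName f)] else []) ++ pvMkL fs (i + 1) cap

theorem pvMkL_stop (fs : List (List (String × String))) (i cap : Nat) (h : cap ≤ i) :
    pvMkL fs i cap = [] := by
  induction fs generalizing i with
  | nil => rfl
  | cons f fs ih =>
    simp only [pvMkL, ih (i + 1) (by omega), List.append_nil]
    rw [if_neg (by rintro ⟨h1, -⟩; omega)]

theorem pvMkL_keys (fs : List (List (String × String))) (i cap : Nat) (k : Int)
    (h : k ∈ (pvMkL fs i cap).map (·.1)) : (i : Int) ≤ k ∧ k < (cap : Int) := by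
  induction fs generalizing i with
  | nil => simp [pvMkL] at h
  | cons f fs ih =>
    simp only [pvMkL, List.map_append, List.mem_append] at h
    rcases h with h | h
    · by_cases hc : i < cap ∧ pvHasName f = true
      · rw [if_pos hc] at h
        simp only [List.map_cons, List.map_nil, List.mem_singleton] at h
        subst h
        omega
      · rw [if_neg hc] at h
        simp at h
    · have := ih (i + 1) h
      push_cast at this ⊢
      omega

theorem pvHasName_nil : pvHasName [] = false := by decide

theorem pvMkL_snoc (fs : List (List (String × String))) (i n : Nat) :
    pvMkL fs i (n + 1) = pvMkL fs i n ++
      (if i ≤ n ∧ n - i < fs.length ∧ pvHasName (fs.getD (n - i) []) = true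
       then [((n : Int), pvName (fs.getD (n - i) []))] else []) := by
  induction fs generalizing i with
  | nil => simp [pvMkL]
  | cons f fs ih =>
    rcases Nat.lt_trichotomy i n with hlt | heq | hgt
    · have hd : (f :: fs).getD (n - i) [] = fs.getD (n - (i + 1)) [] := by
        have hni : n - i = (n - (i + 1)) + 1 := by omega
        simp [hni]
      have h1 : (i < n + 1 ∧ pvHasName f = true) ↔ (i < n ∧ pvHasName f = true) := by
        constructor <;> rintro ⟨_, c⟩ <;> exact ⟨by omega, c⟩
      have h2 : (i + 1 ≤ n ∧ n - (i + 1) < fs.length ∧ pvHasName (fs.getD (n - (i + 1)) []) = true)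
              ↔ (i ≤ n ∧ n - i < (f :: fs).length ∧ pvHasName ((f :: fs).getD (n - i) []) = true) := by
        rw [hd]
        simp only [List.length_cons]
        constructor <;> rintro ⟨a, b, c⟩ <;> exact ⟨by omega, by omega, c⟩
      simp only [pvMkL, ih (i + 1)]
      rw [if_congr h1 rfl rfl,
        if_congr h2
          (show [((n : Int), pvName (fs.getD (n - (i + 1)) []))]
              = [((n : Int), pvName ((f :: fs).getD (n - i) []))] by rw [hd]) rfl,
        List.append_assoc]
    · subst heq
      simp only [pvMkL, List.length_cons]
      rw [pvMkL_stop fs (i + 1) (i + 1) le_rfl, pvMkL_stop fs (i + 1) i (by omega)]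
      simp
    · simp only [pvMkL, List.length_cons]
      rw [pvMkL_stop fs (i + 1) (n + 1) (by omega), pvMkL_stop fs (i + 1) n (by omega)]
      have h1 : ¬ i < n + 1 := by omega
      have h2 : ¬ i < n := by omega
      have h3 : ¬ i ≤ n := by omega
      simp [h1, h2, h3]

-- if the index falls past the end of fs the looked-up element is [] and has no name
theorem pvHasName_getD_lt (fs : List (List (String × String))) (n : Nat)
    (h : pvHasName (fs.getD n []) = true) : n < fs.length := by
  by_contra hn
  rw [List.getD_eq_default _ _ (by omega)] at h
  rw [pvHasName_nil] at h
  exact absurd h (by simp)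

-- phase 2 of A computes pvMkL
theorem pvIndexLoop_eq (fs : List (List (String × String))) (n : Nat) :
    (pvIndexLoop fs n).items = pvMkL fs 0 n := by
  induction n with
  | zero => rw [pvMkL_stop fs 0 0 le_rfl]; rfl
  | succ n ih =>
    have hstep : pvIndexLoop fs (n + 1) =
        (let f := PySem.List.pyGetD fs (n : Int) []
         if f ≠ [] ∧ pvHasName f = true
         then (pvIndexLoop fs n).insert (n : Int) (pvName f) else pvIndexLoop fs n) := by
      unfold pvIndexLoop
      rw [List.range_succ, List.foldl_append]
      rfl
    rw [hstep, pvMkL_snoc fs 0 n]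
    simp only [PySem.List.pyGetD_natCast, Nat.sub_zero]
    by_cases hc : pvHasName (fs.getD n []) = true
    · have hlen : n < fs.length := pvHasName_getD_lt fs n hc
      have hne : fs.getD n [] ≠ [] := by
        intro he; rw [he, pvHasName_nil] at hc; exact absurd hc (by simp)
      have hfresh : (pvIndexLoop fs n).contains (n : Int) = false := by
        rw [PySem.Dict.contains_eq_decide_mem_keys]
        simp only [decide_eq_false_iff_not]
        intro hmem
        have hm : (n : Int) ∈ (pvMkL fs 0 n).map (·.1) := by
          have hkeys : (pvIndexLoop fs n).keys = (pvMkL fs 0 n).map (·.1) := by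
            show (pvIndexLoop fs n).items.map (·.1) = _
            rw [ih]
          rw [← hkeys]; exact hmem
        have := pvMkL_keys fs 0 n (n : Int) hm
        omega
      rw [if_pos ⟨hne, hc⟩, if_pos ⟨Nat.zero_le n, hlen, hc⟩,
        PySem.Dict.items_insert_of_not_contains _ _ hfresh, ih]
    · rw [if_neg (by tauto), if_neg (by tauto), ih, List.append_nil]

-- the padding with empty dicts contributes no entries to pvMkL
theorem pvMkL_replicate (k i cap : Nat) : pvMkL (List.replicate k []) i cap = [] := by
  induction k generalizing i with
  | zero => rfl
  | succ k ih => simp [List.replicate_succ, pvMkL, pvHasName_nil, ih]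

theorem pvMkL_pad (fs : List (List (String × String))) (k i cap : Nat) :
    pvMkL (fs ++ List.replicate k []) i cap = pvMkL fs i cap := by
  induction fs generalizing i with
  | nil => simpa [pvMkL] using pvMkL_replicate k i cap
  | cons f fs ih => simp [pvMkL, ih]

-- phase 1 of A is a partition into the two filters
theorem pvPartition (abi : List (List (String × String)))
    (a b : List (List (String × String))) :
    abi.foldl (fun (s : List (List (String × String)) × List (List (String × String))) func =>
      if pvIsView func then (s.1 ++ [func], s.2)
      else if pvIsAction func then (s.1, s.2 ++ [func])
      else s) (a, b)
    = (a ++ abi.filter pvIsView, b ++ abi.filter pvIsAction) := by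
  induction abi generalizing a b with
  | nil => simp
  | cons f abi ih =>
    by_cases hv : pvIsView f
    · have ha : pvIsAction f = false := by
        revert hv; unfold pvIsView pvIsAction
        rcases h : (PySem.Dict.mk f).get? "stateMutability" with _ | s <;> simp
        rintro rfl; decide
      simp [List.foldl_cons, hv, ha, ih]
    · by_cases hA : pvIsAction f <;>
        simp [List.foldl_cons, hv, hA, ih]

-- B computes pvMkL of the two filters, starting from any counters and any dicts whose
-- keys are below the counters
theorem pvBLoop_eq (abi : List (List (String × String))) (ai vi : Nat)
    (da dv : PySem.Dict Int String)
    (hda : ∀ k ∈ da.keys, k < (ai : Int)) (hdv : ∀ k ∈ dv.keys, k < (vi : Int)) :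
    (pvBLoop abi ai vi da dv).1.items = da.items ++ pvMkL (abi.filter pvIsAction) ai 15 ∧
    (pvBLoop abi ai vi da dv).2.items = dv.items ++ pvMkL (abi.filter pvIsView) vi 10 := by
  induction abi generalizing ai vi da dv with
  | nil => simp [pvBLoop, pvMkL]
  | cons f abi ih =>
    by_cases hv : pvIsView f
    · have ha : pvIsAction f = false := by
        revert hv; unfold pvIsView pvIsAction
        rcases h : (PySem.Dict.mk f).get? "stateMutability" with _ | s <;> simp
        rintro rfl; decide
      simp only [pvBLoop, List.filter_cons, hv, ha, if_true, Bool.false_eq_true,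
        if_false, pvMkL]
      by_cases hc : vi < 10 ∧ pvHasName f = true
      · have hfresh : dv.contains (vi : Int) = false := by
          rw [PySem.Dict.contains_eq_decide_mem_keys]
          simp only [decide_eq_false_iff_not]
          intro hmem; exact absurd (hdv _ hmem) (by omega)
        rw [if_pos hc, if_pos hc]
        have := ih ai (vi + 1) da (dv.insert (vi : Int) (pvName f)) hda
          (by intro k hk
              rcases (PySem.Dict.mem_keys_insert _ _ _ _).1 hk with rfl | hk
              · push_cast; omega
              · have := hdv _ hk; push_cast at this ⊢; omega)
        rw [this.1, this.2, PySem.Dict.items_insert_of_not_contains _ _ hfresh,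
          List.append_assoc]
        exact ⟨rfl, rfl⟩
      · rw [if_neg hc, if_neg hc]
        have := ih ai (vi + 1) da dv hda
          (by intro k hk; have := hdv _ hk; push_cast at this ⊢; omega)
        rw [this.1, this.2, List.nil_append]
        exact ⟨rfl, rfl⟩
    · by_cases hA : pvIsAction f
      · simp only [pvBLoop, hv, Bool.false_eq_true, if_false, List.filter_cons,
          hA, if_true, pvMkL]
        by_cases hc : ai < 15 ∧ pvHasName f = true
        · have hfresh : da.contains (ai : Int) = false := by
            rw [PySem.Dict.contains_eq_decide_mem_keys]
            simp only [decide_eq_false_iff_not]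
            intro hmem; exact absurd (hda _ hmem) (by omega)
          rw [if_pos hc, if_pos hc]
          have := ih (ai + 1) vi (da.insert (ai : Int) (pvName f)) dv
            (by intro k hk
                rcases (PySem.Dict.mem_keys_insert _ _ _ _).1 hk with rfl | hk
                · push_cast; omega
                · have := hda _ hk; push_cast at this ⊢; omega) hdv
          rw [this.1, this.2, PySem.Dict.items_insert_of_not_contains _ _ hfresh,
            List.append_assoc]
          exact ⟨rfl, rfl⟩
        · rw [if_neg hc, if_neg hc]
          have := ih (ai + 1) vi da dv
            (by intro k hk; have := hda _ hk; push_cast at this ⊢; omega) hdv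
          rw [this.1, this.2, List.nil_append]
          exact ⟨rfl, rfl⟩
      · simp only [pvBLoop, hv, hA, Bool.false_eq_true, if_false, List.filter_cons]
        exact ih ai vi da dv hda hdv

-- ===== VERDICT (by name: the statement is the Claim_ definition above) =====
theorem create_function_lookup_spec : Claim_equal_create_function_lookup := by
  intro abi _ _
  unfold Spec_create_function_lookup create_function_lookup create_function_lookup_alt
  rw [pvPartition abi [] []]
  simp only [List.nil_append]
  have hb := pvBLoop_eq abi 0 0 PySem.Dict.empty PySem.Dict.empty
    (by intro k hk; simp [PySem.Dict.keys_empty] at hk)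
    (by intro k hk; simp [PySem.Dict.keys_empty] at hk)
  rw [pvIndexLoop_eq, pvIndexLoop_eq, pvMkL_pad, pvMkL_pad]
  rw [hb.1, hb.2]
  rfl
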